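-- pv_equiv track=rewrite | github.com/zahaale20/CSC-225---Introduction-to-Computer-Organization | binary.py | negate
-- ===== SOURCE A (Python) =====
-- def add(addend_a, addend_b):
--     """
--     Add two 16-bit, two's complement numbers; ignore carries/overflows.
--     TODO: Implement this function. Do *not* convert the numbers to decimal.
--
--     :param addend_a: A bitstring representing the first number
--     :param addend_b: A bitstring representing the second number
--     :return: A bitstring representing the sum
--     """
--     output = ""
--     carry = "0"
--     for c in range(len(addend_a)):
--         if addend_a[len(addend_a) - c - 1] == "0" and addend_b[len(addend_b) - c - 1] == "0":
--             if carry == "1":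
--                 output = "1" + output
--                 carry = "0"
--             elif carry == "0":
--                 output = "0" + output
--                 carry = "0"
--
--         elif (addend_a[len(addend_a) - c - 1] == "1" and addend_b[len(addend_b) - c - 1] == "0") or \
--                 (addend_a[len(addend_a) - c - 1] == "0" and addend_b[len(addend_b) - c - 1] == "1"):
--             if carry == "1":
--                 output = "0" + output
--                 carry = "1"
--             elif carry == "0":
--                 output = "1" + output
--                 carry = "0"
--         elif addend_a[len(addend_a) - c - 1] == "1" and addend_b[len(addend_b) - c - 1] == "1":
--             if carry == "1":
--                 output = "1" + output
--                 carry = "1"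
--             elif carry == "0":
--                 output = "0" + output
--                 carry = "1"
--     return output
--
-- def negate(number):
--     """
--     Negate a 16-bit, two's complement number.
--     TODO: Implement this function. Do *not* convert the number to decimal.
--
--     :param number: A bitstring representing the number to negate
--     :return: A bistring representing the negated number
--     """
--     output = ""
--     for c in range(len(number)):
--         if number[len(number) - 1 - c] == "0":
--             output = "1" + output
--         else:
--             output = "0" + output
--     output = add(output, "0000000000000001")
--     return output
-- ===== SOURCE B (Python) =====
-- def negate(number):
--     # Single right-to-left pass: copy low '0' bits, keep the first set bit,
--     # invert all higher bits (two's complement without an explicit adder).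
--     out = []
--     seen = False
--     for ch in reversed(number):
--         if seen:
--             out.append('1' if ch == '0' else '0')
--         elif ch == '0':
--             out.append('0')
--         else:
--             out.append('1')
--             seen = True
--     return ''.join(reversed(out))
-- ===== Notes on version B (the rewrite author's own statement) =====
-- stated objective: simpler
-- what changed: B replaces A's flip-every-bit pass followed by a full ripple-carry addition of a hard-coded 16-bit one with a single right-to-left scan that copies bits up to and including the lowest set bit and inverts the rest.
-- outside the precondition, e.g. on negate('10000000000000001'): A returns '11111111111111111', B returns '01111111111111111'; on negate('00000000000000000'): A returns '10000000000000000', B returns '00000000000000000'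
import Mathlib
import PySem

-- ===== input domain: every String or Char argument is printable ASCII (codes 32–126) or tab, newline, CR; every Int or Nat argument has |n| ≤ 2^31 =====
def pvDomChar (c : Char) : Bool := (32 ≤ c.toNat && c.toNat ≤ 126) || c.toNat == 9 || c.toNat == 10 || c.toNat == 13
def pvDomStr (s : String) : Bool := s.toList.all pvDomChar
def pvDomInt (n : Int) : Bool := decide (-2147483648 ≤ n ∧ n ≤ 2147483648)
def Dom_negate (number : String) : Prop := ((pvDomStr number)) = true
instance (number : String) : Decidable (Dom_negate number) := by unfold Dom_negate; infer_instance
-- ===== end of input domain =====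

-- B computes the two's complement in one right-to-left scan (copy through the lowest set bit,
-- invert above) instead of A's flip-all-bits pass plus ripple-carry addition of a 16-bit constant: simpler.


-- ===== PORT A =====
-- the 16-char constant "0000000000000001"
def pvOne16 : List Char :=
  ['0','0','0','0','0','0','0','0','0','0','0','0','0','0','0','1']

-- the three-way branch of add's loop body on the two addend bits and the carry
def pvAddCombine (ca cb carry : Char) (output : List Char) : List Char × Char :=
  if ca = '0' ∧ cb = '0' then
    if carry = '1' then ('1' :: output, '0')
    else if carry = '0' then ('0' :: output, '0')
    else (output, carry)
  else if (ca = '1' ∧ cb = '0') ∨ (ca = '0' ∧ cb = '1') then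
    if carry = '1' then ('0' :: output, '1')
    else if carry = '0' then ('1' :: output, '0')
    else (output, carry)
  else if ca = '1' ∧ cb = '1' then
    if carry = '1' then ('1' :: output, '1')
    else if carry = '0' then ('0' :: output, '1')
    else (output, carry)
  else (output, carry)

-- one iteration of add's loop: fetch addend_a[len-c-1] and addend_b[len-c-1], combine
def pvAddStep (la lb : List Char) (st : List Char × Char) (c : Nat) : List Char × Char :=
  pvAddCombine ((PySem.List.pyGet? la ((la.length : Int) - c - 1)).getD '?')
               ((PySem.List.pyGet? lb ((lb.length : Int) - c - 1)).getD '?')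
               st.2 st.1

-- add(addend_a, addend_b)
def pvAdd (addend_a addend_b : String) : String :=
  String.ofList
    ((List.range addend_a.toList.length).foldl
      (pvAddStep addend_a.toList addend_b.toList) ([], '0')).1

-- one iteration of negate's flip loop: prepend the inverse of number[len-1-c]
def pvFlipStep (l : List Char) (out : List Char) (c : Nat) : List Char :=
  if (PySem.List.pyGet? l ((l.length : Int) - 1 - c)).getD '?' = '0'
  then '1' :: out else '0' :: out

def negate (number : String) : String :=
  pvAdd
    (String.ofList ((List.range number.toList.length).foldl (pvFlipStep number.toList) []))
    (String.ofList pvOne16)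

-- ===== PORT B =====
-- scan the bits low-to-high (input reversed): copy while no set bit seen, keep the first
-- set bit, invert after it; result is reversed back at the end
def pvScan : List Char → Bool → List Char
  | [], _ => []
  | ch :: rest, seen =>
      if seen then (if ch = '0' then '1' else '0') :: pvScan rest true
      else if ch = '0' then '0' :: pvScan rest false
      else '1' :: pvScan rest true

def negate_alt (number : String) : String :=
  String.ofList (pvScan number.toList.reverse false).reverse

-- ===== PRECONDITION & SPEC =====
-- A negates a 16-bit number (its documented domain): on longer inputs the hard-coded 16-char
-- addend is indexed with Python negative wraparound (spurious value for 17..32 chars,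
-- IndexError beyond), so Pre_ restricts to at most 16 characters.
def Pre_negate (number : String) : Prop := number.toList.length ≤ 16
instance (number : String) : Decidable (Pre_negate number) := by unfold Pre_negate; infer_instance
def pvWitness_negate : String := "0101"

def Spec_negate (number : String) (out : String) : Prop := out = negate_alt number
instance (number : String) (out : String) : Decidable (Spec_negate number out) := by unfold Spec_negate; infer_instance

-- ===== CLAIM (what is proved, stated in full; the proofs are below) =====
def Claim_equal_negate : Prop := ∀ (number : String), Dom_negate number → Pre_negate number → Spec_negate number (negate number)

-- ===== LEMMAS AND PROOFS =====

def pvFlip (c : Char) : Char := if c = '0' then '1' else '0'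

-- recursive model of A's add-loop with second addend pvOne16, on the high-to-low list
def pvModel : List Char → List Char × Char
  | [] => ([], '0')
  | a :: rest =>
      pvAddCombine a (if rest.length = 0 then '1' else '0') (pvModel rest).2 (pvModel rest).1

theorem pvGet_shift (l : List Char) (a : Char) (c : Nat) (hc : c < l.length) :
    PySem.List.pyGet? (a :: l) (((a :: l).length : Int) - 1 - c) =
    PySem.List.pyGet? l ((l.length : Int) - 1 - c) := by
  have e1 : (((a :: l).length : Int) - 1 - c) = ((l.length - c : Nat) : Int) := by
    simp only [List.length_cons]; omega
  have e2 : ((l.length : Int) - 1 - c) = ((l.length - 1 - c : Nat) : Int) := by omega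
  rw [e1, e2, PySem.List.pyGet?_natCast, PySem.List.pyGet?_natCast]
  obtain ⟨k, hk⟩ : ∃ k, l.length - c = k + 1 := ⟨l.length - 1 - c, by omega⟩
  rw [hk, List.getElem?_cons_succ]
  have : k = l.length - 1 - c := by omega
  rw [this]

theorem one16_lookup (n : Nat) (h : n < 16) :
    (PySem.List.pyGet? pvOne16 ((pvOne16.length : Int) - n - 1)).getD '?' =
    if n = 0 then '1' else '0' := by
  have e : ((pvOne16.length : Int) - n - 1) = ((15 - n : Nat) : Int) := by
    simp only [show pvOne16.length = 16 from rfl]; omega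
  rw [e, PySem.List.pyGet?_natCast]
  interval_cases n <;> rfl

theorem addStep_shift (a : Char) (t lb : List Char) (st : List Char × Char) (c : Nat)
    (hc : c < t.length) : pvAddStep (a :: t) lb st c = pvAddStep t lb st c := by
  unfold pvAddStep
  have e1 : (((a :: t).length : Int) - c - 1) = (((a :: t).length : Int) - 1 - c) := by ring
  have e2 : ((t.length : Int) - c - 1) = ((t.length : Int) - 1 - c) := by ring
  rw [e1, e2, pvGet_shift t a c hc]

theorem addStep_top (a : Char) (t : List Char) (st : List Char × Char) (h : t.length ≤ 15) :
    pvAddStep (a :: t) pvOne16 st t.length =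
    pvAddCombine a (if t.length = 0 then '1' else '0') st.2 st.1 := by
  unfold pvAddStep
  have hca : (PySem.List.pyGet? (a :: t) (((a :: t).length : Int) - (t.length : Int) - 1)).getD '?' = a := by
    have e : (((a :: t).length : Int) - (t.length : Int) - 1) = ((0 : Nat) : Int) := by
      simp only [List.length_cons]; omega
    rw [e, PySem.List.pyGet?_natCast]; rfl
  rw [hca, one16_lookup t.length (by omega)]

theorem pvFold_model (la : List Char) (h : la.length ≤ 16) :
    (List.range la.length).foldl (pvAddStep la pvOne16) ([], '0') = pvModel la := by
  induction la with
  | nil => rfl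
  | cons a t ih =>
    have ht : t.length ≤ 15 := by simp only [List.length_cons] at h; omega
    rw [List.length_cons, List.range_succ, List.foldl_append]
    have hcong : (List.range t.length).foldl (pvAddStep (a :: t) pvOne16) ([], '0')
               = (List.range t.length).foldl (pvAddStep t pvOne16) ([], '0') := by
      apply List.foldl_ext
      intro st c hc
      exact addStep_shift a t pvOne16 st c (List.mem_range.mp hc)
    rw [hcong, ih (by omega)]
    simp only [List.foldl_cons, List.foldl_nil]
    rw [addStep_top a t (pvModel t) ht]
    rfl

theorem pvFlipFold (l : List Char) :
    (List.range l.length).foldl (pvFlipStep l) [] = l.map pvFlip := by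
  induction l with
  | nil => rfl
  | cons a t ih =>
    rw [List.length_cons, List.range_succ, List.foldl_append]
    have hcong : (List.range t.length).foldl (pvFlipStep (a :: t)) []
               = (List.range t.length).foldl (pvFlipStep t) [] := by
      apply List.foldl_ext
      intro out c hc
      unfold pvFlipStep
      rw [pvGet_shift t a c (List.mem_range.mp hc)]
    rw [hcong, ih]
    simp only [List.foldl_cons, List.foldl_nil]
    unfold pvFlipStep
    have hget : (PySem.List.pyGet? (a :: t) (((a :: t).length : Int) - 1 - (t.length : Int))).getD '?' = a := by
      have e : (((a :: t).length : Int) - 1 - (t.length : Int)) = ((0 : Nat) : Int) := by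
        simp only [List.length_cons]; omega
      rw [e, PySem.List.pyGet?_natCast]; rfl
    rw [hget]
    by_cases ha : a = '0' <;> simp [pvFlip, ha]

theorem pvScan_append (xs ys : List Char) (s : Bool) :
    pvScan (xs ++ ys) s = pvScan xs s ++ pvScan ys (s || !xs.all (· == '0')) := by
  induction xs generalizing s with
  | nil => simp [pvScan]
  | cons x xs ih =>
    by_cases hs : s
    · subst hs
      by_cases hx : x = '0' <;> simp [pvScan, hx, ih]
    · have hs' : s = false := by simpa using hs
      subst hs'
      by_cases hx : x = '0' <;>
        [skip; have hxb : (x == '0') = false := by simp [hx]] <;>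
        simp [pvScan, *]

theorem pvScan_flip (l : List Char) :
    pvModel (l.map pvFlip) =
      ((pvScan l.reverse false).reverse,
        if !l.isEmpty && l.all (· == '0') then '1' else '0') := by
  induction l with
  | nil => rfl
  | cons a t ih =>
    simp only [List.map_cons, pvModel, List.length_map, ih, List.reverse_cons, pvScan_append,
               List.reverse_append, List.all_reverse, List.isEmpty_cons, List.all_cons,
               Bool.false_or, Bool.not_false, Bool.true_and]
    rcases t with _ | ⟨b, t'⟩
    · by_cases ha : a = '0' <;>
        simp [ha, pvFlip, pvScan, pvAddCombine]
    · by_cases hall : (b :: t').all (· == '0') <;> by_cases ha : a = '0' <;>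
        simp [ha, hall, pvFlip, pvScan, pvAddCombine, beq_iff_eq]

-- ===== VERDICT (by name: the statement is the Claim_ definition above) =====
theorem negate_spec : Claim_equal_negate := by
  intro number _ hpre
  unfold Pre_negate at hpre
  unfold Spec_negate negate negate_alt pvAdd
  simp only [String.toList_ofList]
  rw [pvFlipFold]
  rw [pvFold_model _ (by simpa using hpre)]
  rw [pvScan_flip]
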